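-- pv_equiv track=rewrite | github.com/iamsantanu21/CBDC | cbdc-token-python/shared/token_utils.py | format_token_display
-- ===== SOURCE A (Python) =====
-- from typing import List, Dict, Tuple, Optional
--
-- def tokens_to_amount(tokens: List[Dict]) -> int:
--     """Calculate total value of tokens"""
--     return sum(t.get('denomination', 0) for t in tokens)
--
-- def format_token_display(tokens: List[Dict]) -> str:
--     """Format tokens for display"""
--     if not tokens:
--         return "No tokens"
--
--     # Group by denomination
--     by_denom = {}
--     for t in tokens:
--         d = t.get('denomination', 0)
--         by_denom[d] = by_denom.get(d, 0) + 1
--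
--     parts = []
--     for denom in sorted(by_denom.keys(), reverse=True):
--         count = by_denom[denom]
--         parts.append(f"₹{denom}×{count}")
--
--     total = tokens_to_amount(tokens)
--     return f"{', '.join(parts)} = ₹{total:,}"
-- ===== SOURCE B (Python) =====
-- from typing import List, Dict
-- from itertools import groupby
--
-- def format_token_display(tokens: List[Dict]) -> str:
--     """Format tokens for display: sort denominations descending, group consecutive runs."""
--     if not tokens:
--         return "No tokens"
--     denoms = sorted((t.get('denomination', 0) for t in tokens), reverse=True)
--     parts = [f"\u20b9{d}\u00d7{sum(1 for _ in g)}" for d, g in groupby(denoms)]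
--     total = sum(denoms)
--     return f"{', '.join(parts)} = \u20b9{total:,}"
-- ===== Notes on version B (the rewrite author's own statement) =====
-- stated objective: idiomatic
-- what changed: Replaces the dict-accumulation-then-key-sort grouping with the idiomatic sort-descending-then-itertools.groupby consecutive-run scan (counts read off runs instead of a counter dict).
import Mathlib
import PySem

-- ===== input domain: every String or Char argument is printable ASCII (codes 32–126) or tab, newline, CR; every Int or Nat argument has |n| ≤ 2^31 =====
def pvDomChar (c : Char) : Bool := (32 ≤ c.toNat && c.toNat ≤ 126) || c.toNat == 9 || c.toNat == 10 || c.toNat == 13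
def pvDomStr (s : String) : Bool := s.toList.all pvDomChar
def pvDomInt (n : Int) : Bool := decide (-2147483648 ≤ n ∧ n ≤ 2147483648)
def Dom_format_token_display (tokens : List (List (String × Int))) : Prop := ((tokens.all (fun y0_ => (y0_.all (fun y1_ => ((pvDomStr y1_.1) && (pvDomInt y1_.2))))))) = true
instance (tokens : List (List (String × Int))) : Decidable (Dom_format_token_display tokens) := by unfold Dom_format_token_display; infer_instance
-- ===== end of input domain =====

-- B replaces A's dict-accumulation-then-key-sort grouping by the idiomatic
-- sort-descending-then-groupby consecutive-run scan; same output, same cost.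


-- ===== PORT A =====
-- shared with port B: t.get('denomination', 0) — first match in the association list, default 0
def getDenom (t : List (String × Int)) : Int :=
  match t.find? (fun p => p.1 == "denomination") with
  | some p => p.2
  | none => 0

-- shared with port B: f"{n:,}" — decimal digits of |n| grouped in threes with ',', '-' in front if negative.
-- commaGroup takes the REVERSED digit list; k counts digits already emitted.
def commaGroup : List Char → Nat → List Char
  | [], _ => []
  | c :: cs, k => c :: (if (k + 1) % 3 = 0 ∧ cs ≠ [] then ',' :: commaGroup cs (k + 1) else commaGroup cs (k + 1))

def commaFmt (n : Int) : String :=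
  if n < 0 then "-" ++ String.ofList ((commaGroup (PySem.Int.toChars (-n)).reverse 0).reverse)
  else String.ofList ((commaGroup (PySem.Int.toChars n).reverse 0).reverse)

-- shared with port B: tokens_to_amount(tokens) = sum(t.get('denomination', 0) for t in tokens)
def tokens_to_amount (tokens : List (List (String × Int))) : Int :=
  (tokens.map getDenom).sum

def format_token_display (tokens : List (List (String × Int))) : String :=
  if tokens = [] then "No tokens"
  else
    -- by_denom[d] = by_denom.get(d, 0) + 1 over the tokens
    let by_denom := tokens.foldl
      (fun d t => d.insert (getDenom t) (d.getD (getDenom t) 0 + 1)) PySem.Dict.empty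
    -- for denom in sorted(by_denom.keys(), reverse=True): parts.append(...)
    -- by_denom[denom]: the key is always present (it came from by_denom.keys()), so getD _ 0 is exact
    let parts := (PySem.List.sorted by_denom.keys (fun x => x) true).foldl
      (fun parts denom =>
        parts ++ ["₹" ++ PySem.Int.toStr denom ++ "×" ++ PySem.Int.toStr (by_denom.getD denom 0)]) []
    let total := tokens_to_amount tokens
    PySem.Str.join ", " parts ++ " = ₹" ++ commaFmt total

-- ===== PORT B =====
-- itertools.groupby over the sorted list: consecutive runs as (value, length)
def groupRuns : List Int → List (Int × Int)
  | [] => []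
  | x :: xs =>
    match groupRuns xs with
    | [] => [(x, 1)]
    | (y, k) :: t => if x = y then (x, k + 1) :: t else (x, 1) :: (y, k) :: t

def format_token_display_alt (tokens : List (List (String × Int))) : String :=
  if tokens = [] then "No tokens"
  else
    let denoms := PySem.List.sorted (tokens.map getDenom) (fun x => x) true
    let parts := (groupRuns denoms).map
      (fun g => "₹" ++ PySem.Int.toStr g.1 ++ "×" ++ PySem.Int.toStr g.2)
    let total := denoms.sum
    PySem.Str.join ", " parts ++ " = ₹" ++ commaFmt total

-- ===== PRECONDITION & SPEC =====
def Spec_format_token_display (tokens : List (List (String × Int))) (out : String) : Prop := out = format_token_display_alt tokens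
instance (tokens : List (List (String × Int))) (out : String) : Decidable (Spec_format_token_display tokens out) := by unfold Spec_format_token_display; infer_instance

-- ===== CLAIM (what is proved, stated in full; the proofs are below) =====
def Claim_equal_format_token_display : Prop := ∀ (tokens : List (List (String × Int))), Dom_format_token_display tokens → Spec_format_token_display tokens (format_token_display tokens)

-- ===== LEMMAS AND PROOFS =====

-- definitional unfolding of groupRuns on a cons (for rewriting only the head occurrence)
theorem groupRuns_cons (x : Int) (xs : List Int) :
    groupRuns (x :: xs) =
      match groupRuns xs with
      | [] => [(x, 1)]
      | (y, k) :: t => if x = y then (x, k + 1) :: t else (x, 1) :: (y, k) :: t := rfl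

-- head key of groupRuns (x :: xs) is x
theorem groupRuns_cons_ex (x : Int) (xs : List Int) :
    ∃ k t, groupRuns (x :: xs) = (x, k) :: t := by
  rw [groupRuns_cons]
  cases h : groupRuns xs with
  | nil => exact ⟨1, [], rfl⟩
  | cons p t =>
    obtain ⟨y, k⟩ := p
    by_cases hxy : x = y
    · subst hxy; exact ⟨k + 1, t, by simp⟩
    · exact ⟨1, (y, k) :: t, by simp [hxy]⟩

-- a nonempty constant run followed by a list starting differently forms one group
theorem groupRuns_replicate_append (d : Int) (n : Nat) (rest : List Int)
    (hrest : rest = [] ∨ ∃ r t', rest = r :: t' ∧ r ≠ d) (hn : 0 < n) :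
    groupRuns (List.replicate n d ++ rest) = (d, (n : Int)) :: groupRuns rest := by
  induction n with
  | zero => omega
  | succ m ih =>
    by_cases hm : 0 < m
    · rw [List.replicate_succ, List.cons_append, groupRuns_cons, ih hm]
      have hc : ((m + 1 : Nat) : Int) = (m : Int) + 1 := by push_cast; ring
      simp [hc]
    · have hm0 : m = 0 := by omega
      subst hm0
      simp only [List.replicate_succ, List.replicate_zero, List.nil_append, List.cons_append]
      rw [groupRuns_cons]
      rcases hrest with h0 | ⟨r, t', hrt, hrd⟩
      · subst h0; rfl
      · subst hrt
        obtain ⟨k, t, hk⟩ := groupRuns_cons_ex r t'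
        rw [hk]
        simp [Ne.symm hrd]

-- groupby of a flatMap of nonempty replicates over a strictly-descending list
theorem groupRuns_flatMap (L : List Int) (c : Int → Nat)
    (hL : L.Pairwise (fun a b => b < a)) (hc : ∀ d ∈ L, 0 < c d) :
    groupRuns (L.flatMap (fun d => List.replicate (c d) d)) =
      L.map (fun d => (d, ((c d : Nat) : Int))) := by
  induction L with
  | nil => rfl
  | cons d L' ih =>
    have hL' : L'.Pairwise (fun a b => b < a) := (List.pairwise_cons.mp hL).2
    have hlt : ∀ b ∈ L', b < d := (List.pairwise_cons.mp hL).1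
    have hstep := ih hL' (fun x hx => hc x (List.mem_cons_of_mem _ hx))
    simp only [List.flatMap_cons]
    rw [groupRuns_replicate_append d (c d) _ ?_ (hc d (List.mem_cons_self))]
    · rw [hstep]; simp
    · cases L' with
      | nil => left; simp
      | cons d' L'' =>
        right
        have hcd' : 0 < c d' := hc d' (by simp)
        refine ⟨d', List.replicate (c d' - 1) d' ++ L''.flatMap (fun d => List.replicate (c d) d), ?_, ?_⟩
        · simp only [List.flatMap_cons]
          rw [← List.cons_append]
          congr 1
          rw [← List.replicate_succ]
          congr 1
          omega
        · exact ne_of_lt (hlt d' (by simp))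

-- counting in a flatMap of replicates over a nodup list
theorem count_flatMap_replicate (L : List Int) (c : Int → Nat) (hL : L.Nodup) (e : Int) :
    (L.flatMap (fun d => List.replicate (c d) d)).count e = if e ∈ L then c e else 0 := by
  induction L with
  | nil => simp
  | cons d L' ih =>
    have hnd : d ∉ L' := (List.nodup_cons.mp hL).1
    have ih' := ih (List.nodup_cons.mp hL).2
    simp only [List.flatMap_cons, List.count_append, List.count_replicate, ih', List.mem_cons]
    by_cases hed : e = d
    · subst hed
      simp [hnd]
    · simp [hed, Ne.symm hed]

-- the flatMap of replicates is weakly descending when L is strictly descending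
theorem pairwise_flatMap_replicate (L : List Int) (c : Int → Nat)
    (hL : L.Pairwise (fun a b => b < a)) :
    (L.flatMap (fun d => List.replicate (c d) d)).Pairwise (fun a b => b ≤ a) := by
  induction L with
  | nil => simp
  | cons d L' ih =>
    have hlt : ∀ b ∈ L', b < d := (List.pairwise_cons.mp hL).1
    have ih' := ih (List.pairwise_cons.mp hL).2
    simp only [List.flatMap_cons]
    rw [List.pairwise_append]
    refine ⟨List.pairwise_replicate.mpr (by simp), ih', ?_⟩
    intro a ha b hb
    have had : a = d := List.eq_of_mem_replicate ha
    obtain ⟨d', hd', hb'⟩ := List.mem_flatMap.mp hb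
    have hbd' : b = d' := List.eq_of_mem_replicate hb'
    subst had hbd'
    exact le_of_lt (hlt _ hd')

-- uniqueness of reverse-sorted order (id key): any weakly-descending rearrangement is the sort
theorem sorted_rev_id_unique (xs ys : List Int)
    (hp : ys.Perm xs) (hs : ys.Pairwise (fun a b => b ≤ a)) :
    PySem.List.sorted xs (fun x => x) true = ys := by
  have hs' : (PySem.List.sorted xs (fun x => x) true).Pairwise (fun a b => b ≤ a) :=
    PySem.List.sorted_pairwise_rev xs (fun x => x)
  have hperm : (PySem.List.sorted xs (fun x => x) true).Perm ys :=
    (PySem.List.sorted_perm xs (fun x => x) true).trans hp.symm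
  exact hperm.eq_of_pairwise (fun a b _ _ h1 h2 => le_antisymm h2 h1) hs' hs

-- the central identity: grouping the descending sort = counting per distinct key, keys sorted descending
theorem groupRuns_sorted_eq (xs : List Int) :
    groupRuns (PySem.List.sorted xs (fun x => x) true) =
      (PySem.List.sorted (PySem.Set.ofList xs) (fun x => x) true).map
        (fun d => (d, ((xs.count d : Nat) : Int))) := by
  set K : List Int := PySem.Set.ofList xs with hK
  set L : List Int := PySem.List.sorted K (fun x => x) true with hL
  have hKnodup : K.Nodup := PySem.Set.nodup_ofList xs
  have hLpermK : L.Perm K := PySem.List.sorted_perm K (fun x => x) true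
  have hLnodup : L.Nodup := hLpermK.symm.nodup hKnodup
  have hLdesc : L.Pairwise (fun a b => b ≤ a) := PySem.List.sorted_pairwise_rev K (fun x => x)
  have hLstrict : L.Pairwise (fun a b => b < a) := by
    have hne : L.Pairwise (fun a b => a ≠ b) := hLnodup
    exact (List.Pairwise.and hLdesc hne).imp (fun h => lt_of_le_of_ne h.1 (Ne.symm h.2))
  have hmemL : ∀ e, e ∈ L ↔ e ∈ xs := by
    intro e
    rw [hLpermK.mem_iff, hK, PySem.Set.mem_ofList]
  set M : List Int := L.flatMap (fun d => List.replicate (xs.count d) d) with hM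
  have hMperm : M.Perm xs := by
    rw [List.perm_iff_count]
    intro e
    rw [hM, count_flatMap_replicate L _ hLnodup e]
    by_cases he : e ∈ xs
    · simp [(hmemL e).mpr he]
    · simp [List.count_eq_zero_of_not_mem he]
  have hMdesc : M.Pairwise (fun a b => b ≤ a) := pairwise_flatMap_replicate L _ hLstrict
  have hsorted : PySem.List.sorted xs (fun x => x) true = M :=
    sorted_rev_id_unique xs M hMperm hMdesc
  rw [hsorted, hM]
  exact groupRuns_flatMap L _ hLstrict
    (fun d hd => List.count_pos_iff.mpr ((hmemL d).mp hd))

-- ===== VERDICT (by name: the statement is the Claim_ definition above) =====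
theorem format_token_display_spec : Claim_equal_format_token_display := by
  intro tokens _
  unfold Spec_format_token_display format_token_display format_token_display_alt
  by_cases h : tokens = []
  · simp [h]
  · simp only [if_neg h]
    set xs : List Int := tokens.map getDenom with hxs
    have hfold : tokens.foldl
        (fun d t => d.insert (getDenom t) (d.getD (getDenom t) 0 + 1)) PySem.Dict.empty
        = PySem.Dict.counter xs := by
      rw [hxs, ← PySem.Dict.foldl_insert_getD_add_one_eq_counter]
      exact (List.foldl_map (f := getDenom)
        (g := fun (d : PySem.Dict Int Int) (x : Int) => d.insert x (d.getD x 0 + 1))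
        (l := tokens) (init := PySem.Dict.empty)).symm
    rw [hfold, PySem.Dict.keys_counter]
    rw [PySem.List.foldl_append_singleton_eq_map]
    rw [groupRuns_sorted_eq xs, List.map_map]
    have hsum : (PySem.List.sorted xs (fun x => x) true).sum = xs.sum :=
      (PySem.List.sorted_perm xs (fun x => x) true).sum_eq
    rw [hsum]
    congr 1
    congr 1
    exact congrArg (PySem.Str.join ", ") (List.map_congr_left (fun d _ => by
      simp [Function.comp_apply, PySem.Dict.getD_counter]))
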